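-- pv_equiv track=rewrite | github.com/Andrey-Figueroa/Python-2024 | Laboratorio 5.py | formarNumero
-- ===== SOURCE A (Python) =====
-- def formarNumero(pNum, pDigito):
--     pNum = abs(pNum)
--     pDigito = abs(pDigito)
--     posicion = 0
--     resultado = 0
--     while pNum != 0:
--         digitoPNum = pNum % 10
--         if digitoPNum % pDigito == 0:
--             resultado = resultado + (digitoPNum * 10 ** posicion)
--             posicion += 1
--         pNum = pNum // 10
--     return resultado
-- ===== SOURCE B (Python) =====
-- def formarNumero(pNum, pDigito):
--     pNum = abs(pNum)
--     pDigito = abs(pDigito)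
--     if pNum == 0:
--         return 0
--     resultado = 0
--     for ch in str(pNum):
--         d = int(ch)
--         if d % pDigito == 0:
--             resultado = resultado * 10 + d
--     return resultado
-- ===== Notes on version B (the rewrite author's own statement) =====
-- stated objective: idiomatic
-- what changed: B walks the decimal string of |pNum| most-significant-digit first with shift-and-add (resultado*10+d) instead of A's arithmetic digit extraction with %10,//10 and an explicit power-of-ten position counter.
import Mathlib
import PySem

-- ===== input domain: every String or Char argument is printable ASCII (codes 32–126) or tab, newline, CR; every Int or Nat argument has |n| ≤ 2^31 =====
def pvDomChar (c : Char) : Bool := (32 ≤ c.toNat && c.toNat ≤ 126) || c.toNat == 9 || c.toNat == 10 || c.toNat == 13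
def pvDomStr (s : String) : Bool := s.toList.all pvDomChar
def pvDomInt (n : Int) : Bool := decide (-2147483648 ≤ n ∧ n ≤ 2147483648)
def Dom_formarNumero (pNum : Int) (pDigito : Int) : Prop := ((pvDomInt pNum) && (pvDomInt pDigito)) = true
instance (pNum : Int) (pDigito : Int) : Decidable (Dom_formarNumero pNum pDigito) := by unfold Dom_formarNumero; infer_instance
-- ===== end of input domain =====

-- B rebuilds the number from the decimal string of |pNum|, most-significant digit first,
-- with shift-and-add, instead of A's %10 // 10 extraction with a power-of-ten position counter.


-- ===== PORT A =====
-- the while loop of A; pNum is |pNum| here (A sets pNum = abs(pNum) first), hence a Nat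
def formarNumeroLoop (pNum : Nat) (pDigito : Int) (posicion : Nat) (resultado : Int) : Int :=
  if h : pNum ≠ 0 then
    -- digitoPNum = pNum % 10 (written inline)
    if PySem.Int.mod ((pNum % 10 : Nat) : Int) pDigito = 0 then
      formarNumeroLoop (pNum / 10) pDigito (posicion + 1) (resultado + ((pNum % 10 : Nat) : Int) * 10 ^ posicion)
    else
      formarNumeroLoop (pNum / 10) pDigito posicion resultado
  else resultado
  termination_by pNum
  decreasing_by
    all_goals exact Nat.div_lt_self (Nat.pos_of_ne_zero h) (by norm_num)

def formarNumero (pNum : Int) (pDigito : Int) : Int :=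
  formarNumeroLoop pNum.natAbs |pDigito| 0 0

-- ===== PORT B =====
-- int(ch) for a single decimal digit character (exact on '0'..'9', the only chars str(|n|) produces)
def pvDigitVal (c : Char) : Int := ((c.toNat - '0'.toNat : Nat) : Int)

def formarNumero_alt (pNum : Int) (pDigito : Int) : Int :=
  let n := |pNum|
  let d := |pDigito|
  if n = 0 then 0
  else
    (PySem.Int.toStr n).toList.foldl
      (fun resultado ch =>
        if PySem.Int.mod (pvDigitVal ch) d = 0 then resultado * 10 + pvDigitVal ch
        else resultado) 0

-- ===== PRECONDITION & SPEC =====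
-- Pre_ excludes exactly the inputs where Python A raises ZeroDivisionError:
-- pDigito = 0 with pNum ≠ 0 (digit % 0 is evaluated); with pNum = 0 the loop never runs.
def Pre_formarNumero (pNum : Int) (pDigito : Int) : Prop := pDigito ≠ 0 ∨ pNum = 0
instance (pNum : Int) (pDigito : Int) : Decidable (Pre_formarNumero pNum pDigito) := by
  unfold Pre_formarNumero; infer_instance

def pvWitness_formarNumero : Int × Int := (3625, 3)

def Spec_formarNumero (pNum : Int) (pDigito : Int) (out : Int) : Prop := out = formarNumero_alt pNum pDigito
instance (pNum : Int) (pDigito : Int) (out : Int) : Decidable (Spec_formarNumero pNum pDigito out) := by unfold Spec_formarNumero; infer_instance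

-- ===== CLAIM (what is proved, stated in full; the proofs are below) =====
def Claim_equal_formarNumero : Prop := ∀ (pNum : Int) (pDigito : Int), Dom_formarNumero pNum pDigito → Pre_formarNumero pNum pDigito → Spec_formarNumero pNum pDigito (formarNumero pNum pDigito)

-- ===== LEMMAS AND PROOFS =====

-- the value both programs compute, as a structural recursion over the decimal digits of n
def pvFval (n : Nat) (p : Int) : Int :=
  if h : n = 0 then 0
  else if PySem.Int.mod ((n % 10 : Nat) : Int) p = 0 then ((n % 10 : Nat) : Int) + 10 * pvFval (n / 10) p
  else pvFval (n / 10) p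
  termination_by n
  decreasing_by
    all_goals exact Nat.div_lt_self (Nat.pos_of_ne_zero h) (by norm_num)

-- number of kept digits
def pvKcnt (n : Nat) (p : Int) : Nat :=
  if h : n = 0 then 0
  else if PySem.Int.mod ((n % 10 : Nat) : Int) p = 0 then pvKcnt (n / 10) p + 1
  else pvKcnt (n / 10) p
  termination_by n
  decreasing_by
    all_goals exact Nat.div_lt_self (Nat.pos_of_ne_zero h) (by norm_num)

theorem pvLoop_eq (n : Nat) (p : Int) : ∀ (pos : Nat) (r : Int),
    formarNumeroLoop n p pos r = r + pvFval n p * 10 ^ pos := by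
  induction n using Nat.strong_induction_on with
  | _ n ih =>
    intro pos r
    by_cases h : n = 0
    · simp [formarNumeroLoop, pvFval, h]
    · have hlt : n / 10 < n := Nat.div_lt_self (Nat.pos_of_ne_zero h) (by norm_num)
      conv_lhs => rw [formarNumeroLoop]
      conv_rhs => rw [pvFval]
      rw [dif_pos h, dif_neg h]
      split_ifs with hk
      · rw [ih _ hlt, pow_succ]; ring
      · rw [ih _ hlt]

theorem pvDigitVal_digitChar (d : Nat) (hd : d < 10) : pvDigitVal (Nat.digitChar d) = (d : Int) := by
  interval_cases d <;> decide

theorem pvFold_eq (p : Int) (n : Nat) : ∀ (r : Int),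
    List.foldl (fun r ch => if PySem.Int.mod (pvDigitVal ch) p = 0 then r * 10 + pvDigitVal ch else r)
      r ((Nat.digits 10 n).reverse.map Nat.digitChar)
    = r * 10 ^ pvKcnt n p + pvFval n p := by
  induction n using Nat.strong_induction_on with
  | _ n ih =>
    intro r
    by_cases h : n = 0
    · simp [h, pvKcnt, pvFval]
    · have hd : Nat.digits 10 n = n % 10 :: Nat.digits 10 (n / 10) :=
        Nat.digits_def' (by norm_num) (Nat.pos_of_ne_zero h)
      have hlt : n / 10 < n := Nat.div_lt_self (Nat.pos_of_ne_zero h) (by norm_num)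
      rw [hd]
      simp only [List.reverse_cons, List.map_append, List.map_cons, List.map_nil,
        List.foldl_append, List.foldl_cons, List.foldl_nil]
      rw [ih _ hlt, pvDigitVal_digitChar _ (Nat.mod_lt n (by norm_num))]
      conv_rhs => rw [pvFval, pvKcnt]
      rw [dif_neg h, dif_neg h]
      split_ifs with hk
      · rw [pow_succ]; ring
      · ring

theorem pvToDigitsCore_eq : ∀ (fuel n : Nat) (ds : List Char), n < fuel → n ≠ 0 →
    Nat.toDigitsCore 10 fuel n ds = (Nat.digits 10 n).reverse.map Nat.digitChar ++ ds := by
  intro fuel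
  induction fuel with
  | zero => intro n ds h; omega
  | succ fuel ih =>
    intro n ds hlt hn
    have hd : Nat.digits 10 n = n % 10 :: Nat.digits 10 (n / 10) :=
      Nat.digits_def' (by norm_num) (Nat.pos_of_ne_zero hn)
    rw [Nat.toDigitsCore]
    by_cases hr : n / 10 = 0
    · simp only [hr]
      have : Nat.digits 10 (n / 10) = [] := by rw [hr]; simp
      rw [hd, this]; simp
    · simp only [if_neg hr]
      have hrn : n / 10 < fuel := by
        have h1 : n / 10 < n := Nat.div_lt_self (Nat.pos_of_ne_zero hn) (by norm_num)
        omega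
      rw [ih _ _ hrn hr, hd]
      simp only [List.reverse_cons, List.map_append, List.map_cons, List.map_nil,
        List.append_assoc, List.cons_append, List.nil_append]

theorem pvToDigits_eq (n : Nat) (hn : n ≠ 0) :
    Nat.toDigits 10 n = (Nat.digits 10 n).reverse.map Nat.digitChar := by
  rw [Nat.toDigits, pvToDigitsCore_eq (n + 1) n [] (by omega) hn, List.append_nil]

-- ===== VERDICT (by name: the statement is the Claim_ definition above) =====
theorem formarNumero_spec : Claim_equal_formarNumero := by
  unfold Claim_equal_formarNumero
  intro pNum pDigito _ _
  unfold Spec_formarNumero formarNumero formarNumero_alt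
  by_cases h : pNum = 0
  · simp [h, formarNumeroLoop]
  · have habs : |pNum| ≠ 0 := by simpa using h
    simp only [habs]
    rw [PySem.Int.toList_toStr]
    have hpos : ¬ |pNum| < 0 := not_lt.mpr (abs_nonneg pNum)
    rw [PySem.Int.toChars, if_neg hpos]
    have htn : |pNum|.toNat = pNum.natAbs := by
      rcases abs_cases pNum with ⟨he, _⟩ | ⟨he, _⟩ <;> rw [he] <;> omega
    rw [htn, pvToDigits_eq _ (by simpa using h), pvFold_eq, pvLoop_eq]
    simp
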